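-- pv_equiv track=rewrite | github.com/UJHa/Codeit-Study | 프로그래머스/02_Level2/04_124_나라의_숫자/jinhwan.py | solution
-- ===== SOURCE A (Python) =====
-- def solution(n):
--     answer = ''
--     change_dict = {1: '1', 2: '2', 0: '4'}
--
--     while n != 0:
--         next_num = n % 3
--         answer = change_dict[next_num] + answer
--         if n % 3 == 0:
--             n -= 3
--         else:
--             n -= next_num
--         n //= 3
--     return answer
-- ===== SOURCE B (Python) =====
-- def solution(n):
--     if n == 0:
--         return ''
--     q, r = divmod(n - 1, 3)
--     return solution(q) + '124'[r]
-- ===== Notes on version B (the rewrite author's own statement) =====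
-- stated objective: simpler
-- what changed: Replaces the while loop with dict lookup, prepend accumulator and the explicit n-=3 borrow by a three-line recursion on (n-1)//3 that appends the digit '124'[(n-1)%3], the standard bijective-base-3 formulation.
import Mathlib
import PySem

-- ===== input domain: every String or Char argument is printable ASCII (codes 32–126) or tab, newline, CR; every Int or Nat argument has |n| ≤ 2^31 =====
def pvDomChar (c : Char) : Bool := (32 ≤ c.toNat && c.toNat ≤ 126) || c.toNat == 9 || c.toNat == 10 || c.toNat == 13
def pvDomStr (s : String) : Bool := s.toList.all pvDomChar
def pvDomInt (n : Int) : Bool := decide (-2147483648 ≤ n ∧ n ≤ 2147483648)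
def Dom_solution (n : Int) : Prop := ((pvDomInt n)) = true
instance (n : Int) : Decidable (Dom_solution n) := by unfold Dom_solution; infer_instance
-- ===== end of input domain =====

-- B replaces A's while loop (dict lookup, prepend accumulator, n-=3 borrow) by the standard
-- bijective-base-3 recursion on (n-1)//3 appending the digit '124'[(n-1)%3]; objective: simpler.


-- ===== PORT A =====
def changeDict : PySem.Dict Int String := PySem.Dict.ofList [(1, "1"), (2, "2"), (0, "4")]

-- the while loop; for n < 0 the Python loop diverges (outside Pre_), we stop (totality guard)
def solutionGo (n : Int) (answer : String) : String :=
  if _h0 : n = 0 then answer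
  else if _hneg : n < 0 then answer
  else
    let next := PySem.Int.mod n 3
    let answer' := ((PySem.Dict.get? changeDict next).getD "") ++ answer
    let n' := PySem.Int.floordiv (if PySem.Int.mod n 3 = 0 then n - 3 else n - next) 3
    solutionGo n' answer'
termination_by n.toNat
decreasing_by
  simp only [PySem.Int.mod_eq_emod_of_pos (by omega : (0:Int) < 3),
    PySem.Int.floordiv_eq_ediv_of_pos (by omega : (0:Int) < 3)]
  split <;> omega

def solution (n : Int) : String := solutionGo n ""

-- ===== PORT B =====
-- for n < 0 the Python recursion raises RecursionError (outside Pre_), we stop (totality guard)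
def solution_alt (n : Int) : String :=
  if _h0 : n = 0 then ""
  else if _hneg : n < 0 then ""
  else
    let q := PySem.Int.floordiv (n - 1) 3
    let r := PySem.Int.mod (n - 1) 3
    solution_alt q ++ (((PySem.Str.pyGet? "124" r).map toString).getD "")
termination_by n.toNat
decreasing_by
  simp only [PySem.Int.floordiv_eq_ediv_of_pos (by omega : (0:Int) < 3)]
  omega

-- ===== PRECONDITION & SPEC =====
-- Pre_ excludes n < 0, on which A's while loop never terminates (and B's recursion raises).
def Pre_solution (n : Int) : Prop := 0 ≤ n
instance (n : Int) : Decidable (Pre_solution n) := by unfold Pre_solution; infer_instance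
def pvWitness_solution : Int := (5)

def Spec_solution (n : Int) (out : String) : Prop := out = solution_alt n
instance (n : Int) (out : String) : Decidable (Spec_solution n out) := by unfold Spec_solution; infer_instance

-- ===== CLAIM (what is proved, stated in full; the proofs are below) =====
def Claim_equal_solution : Prop := ∀ (n : Int), Dom_solution n → Pre_solution n → Spec_solution n (solution n)

-- ===== LEMMAS AND PROOFS =====

theorem solution_go_eq (m : Nat) : ∀ (n : Int), 0 ≤ n → n.toNat ≤ m →
    ∀ acc : String, solutionGo n acc = solution_alt n ++ acc := by
  induction m with
  | zero =>
    intro n hn hm acc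
    have : n = 0 := by omega
    subst this
    simp [solutionGo, solution_alt]
  | succ m ih =>
    intro n hn hm acc
    by_cases h0 : n = 0
    · subst h0; simp [solutionGo, solution_alt]
    · rw [solutionGo, solution_alt]
      simp only [h0, dif_neg, not_false_iff]
      have hneg : ¬ n < 0 := by omega
      simp only [hneg, dif_neg, not_false_iff]
      have hpos : 0 < n := by omega
      have hmod : PySem.Int.mod n 3 = n % 3 :=
        PySem.Int.mod_eq_emod_of_pos (by omega)
      have hmod1 : PySem.Int.mod (n - 1) 3 = (n - 1) % 3 :=
        PySem.Int.mod_eq_emod_of_pos (by omega)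
      -- the next value of n is the same in both programs
      have hq : PySem.Int.floordiv (if PySem.Int.mod n 3 = 0 then n - 3 else n - PySem.Int.mod n 3) 3
          = PySem.Int.floordiv (n - 1) 3 := by
        simp only [hmod, PySem.Int.floordiv_eq_ediv_of_pos (by omega : (0:Int) < 3)]
        split <;> omega
      -- the digit emitted is the same in both programs
      have hdig : ((PySem.Dict.get? changeDict (PySem.Int.mod n 3)).getD "")
          = (((PySem.Str.pyGet? "124" (PySem.Int.mod (n - 1) 3)).map toString).getD "") := by
        rw [hmod, hmod1]
        have h3 : n % 3 = 0 ∨ n % 3 = 1 ∨ n % 3 = 2 := by omega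
        rcases h3 with h | h | h <;>
        · have h' : (n - 1) % 3 = (if n % 3 = 0 then 2 else n % 3 - 1) := by omega
          rw [h', h]
          decide
      rw [hq, hdig]
      have hq0 : 0 ≤ PySem.Int.floordiv (n - 1) 3 := by
        rw [PySem.Int.floordiv_eq_ediv_of_pos (by omega : (0:Int) < 3)]; omega
      have hqm : (PySem.Int.floordiv (n - 1) 3).toNat ≤ m := by
        rw [PySem.Int.floordiv_eq_ediv_of_pos (by omega : (0:Int) < 3)]; omega
      rw [ih _ hq0 hqm]
      simp [String.append_assoc]

-- ===== VERDICT (by name: the statement is the Claim_ definition above) =====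
theorem solution_spec : Claim_equal_solution := by
  intro n _ hpre
  unfold Spec_solution solution
  rw [solution_go_eq n.toNat n hpre (le_refl _)]
  simp
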